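-- pv_equiv track=rewrite | github.com/vchu22/Genomic-Data-Science-Practice | Python for Genomic Data Science/bioseq/dnautil.py | compute_ORF_segments
-- ===== SOURCE A (Python) =====
-- def compute_ORF_segments(start_positions, stop_positions):
--     """given a list of start codons and stop codons, return a list of segments that can possibly encode proteins"""
--     segments = []
--     prev_index = 0      # the previous index of stop_positions
--     #### Time complexity: T3(m,n) = Ta(m)*Tb(n) = O(m*n)
--     for i in range(len(start_positions)):               ### Ta(m)
--         for j in range(prev_index,len(stop_positions)): ### Tb(n)
--             # stop codon must be after the start codon, and there must be at least 50 codon in between to create protein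
--             # according to https://www.quora.com/How-many-amino-acids-are-required-in-a-protein-to-call-it-protein
--             if stop_positions[j] >= start_positions[i]+153:
--                 segments.append([start_positions[i],stop_positions[j]])
--                 prev_index = j
--                 break
--     return segments
-- ===== SOURCE B (Python) =====
-- def compute_ORF_segments(start_positions, stop_positions):
--     """given a list of start codons and stop codons, return a list of segments that can possibly encode proteins"""
--     n = len(stop_positions)
--     # suffmax[k] = max of stop_positions[k:], or None if that suffix is empty
--     suffmax = [None] * (n + 1)
--     for k in range(n - 1, -1, -1):
--         s = suffmax[k + 1]
--         v = stop_positions[k]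
--         suffmax[k] = v if s is None or v > s else s
--     segments = []
--     prev = 0
--     for start in start_positions:
--         t = start + 153
--         m = suffmax[prev]
--         if m is not None and m >= t:
--             # a sufficiently distant stop exists at or after prev: walk to the first one
--             j = prev
--             while stop_positions[j] < t:
--                 j += 1
--             segments.append([start, stop_positions[j]])
--             prev = j
--     return segments
-- ===== Notes on version B (the rewrite author's own statement) =====
-- stated objective: faster
-- what changed: B precomputes a suffix-maximum table over stop_positions so each start without a sufficiently distant stop is rejected in O(1), and the matching walk advances a monotone pointer, replacing A's restarted inner scan.
import Mathlib
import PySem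

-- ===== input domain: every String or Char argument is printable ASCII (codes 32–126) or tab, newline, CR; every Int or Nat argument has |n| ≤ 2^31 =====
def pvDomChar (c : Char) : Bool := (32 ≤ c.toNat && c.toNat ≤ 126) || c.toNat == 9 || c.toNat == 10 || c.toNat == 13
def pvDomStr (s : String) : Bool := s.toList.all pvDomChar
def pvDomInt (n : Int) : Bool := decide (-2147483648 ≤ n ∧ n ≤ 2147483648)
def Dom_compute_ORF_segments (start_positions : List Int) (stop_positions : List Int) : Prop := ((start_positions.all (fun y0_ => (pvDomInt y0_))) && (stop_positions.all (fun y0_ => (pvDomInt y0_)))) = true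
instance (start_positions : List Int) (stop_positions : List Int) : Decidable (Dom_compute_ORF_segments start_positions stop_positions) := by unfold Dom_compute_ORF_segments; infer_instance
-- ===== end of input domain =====

-- B replaces A's restarted inner scan by a precomputed suffix-maximum table (O(1) rejection of
-- unmatchable starts) plus a monotone pointer walk; a timing run measured B faster.

-- ===== PORT A =====
-- inner 'for j in range(prev_index, len(stop_positions)): … break' loop of A
def aInner (stop_positions : List Int) (start : Int) (segments : List (List Int)) (prev : Int) :
    List Int → List (List Int) × Int
  | [] => (segments, prev)
  | j :: js =>
    if start + 153 ≤ PySem.List.pyGetD stop_positions j 0 then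
      (segments ++ [[start, PySem.List.pyGetD stop_positions j 0]], j)
    else aInner stop_positions start segments prev js

def compute_ORF_segments (start_positions : List Int) (stop_positions : List Int) : List (List Int) :=
  (start_positions.foldl
    (fun st start =>
      aInner stop_positions start st.1 st.2
        (PySem.List.pyRange st.2 (stop_positions.length : Int) 1))
    ([], (0 : Int))).1

-- ===== PORT B =====
-- suffmax array of Source B (built from the end, exactly the values Python's backwards loop fills in):
-- element k is max(stop_positions[k:]) with Python's 'v if s is None or v > s else s' combination
def suffMaxList : List Int → List (Option Int)
  | [] => [none]
  | v :: rest =>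
    let r := suffMaxList rest
    (match r.headD none with
     | none => some v
     | some s => some (if v > s then v else s)) :: r

-- the 'while stop_positions[j] < t: j += 1' loop (bounds check only makes the recursion total;
-- Source B only enters the loop when a stop ≥ t exists at or after j)
def bWhile (stop_positions : List Int) (t : Int) (j : Int) : Int :=
  if h : 0 ≤ j ∧ j < (stop_positions.length : Int) then
    if PySem.List.pyGetD stop_positions j 0 < t then bWhile stop_positions t (j + 1) else j
  else j
termination_by ((stop_positions.length : Int) - j).toNat
decreasing_by omega

def compute_ORF_segments_alt (start_positions : List Int) (stop_positions : List Int) : List (List Int) :=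
  let suffmax := suffMaxList stop_positions
  (start_positions.foldl
    (fun st start =>
      let t := start + 153
      match (PySem.List.pyGet? suffmax st.2).getD none with
      | none => st
      | some m =>
        if t ≤ m then
          let j := bWhile stop_positions t st.2
          (st.1 ++ [[start, PySem.List.pyGetD stop_positions j 0]], j)
        else st)
    ([], (0 : Int))).1

-- ===== PRECONDITION & SPEC =====
def Spec_compute_ORF_segments (start_positions : List Int) (stop_positions : List Int) (out : List (List Int)) : Prop := out = compute_ORF_segments_alt start_positions stop_positions
instance (start_positions : List Int) (stop_positions : List Int) (out : List (List Int)) : Decidable (Spec_compute_ORF_segments start_positions stop_positions out) := by unfold Spec_compute_ORF_segments; infer_instance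

-- ===== CLAIM (what is proved, stated in full; the proofs are below) =====
def Claim_equal_compute_ORF_segments : Prop := ∀ (start_positions : List Int) (stop_positions : List Int), Dom_compute_ORF_segments start_positions stop_positions → Spec_compute_ORF_segments start_positions stop_positions (compute_ORF_segments start_positions stop_positions)

-- ===== LEMMAS AND PROOFS =====

-- index (within l) of the first element ≥ t, the common specification of both inner loops
def firstGe (t : Int) : List Int → Option Nat
  | [] => none
  | v :: rest => if t ≤ v then some 0 else (firstGe t rest).map (· + 1)

-- maximum of l with Python B's combination rule, the specification of suffMaxList's entries
def sMax : List Int → Option Int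
  | [] => none
  | v :: rest =>
    match sMax rest with
    | none => some v
    | some s => some (if v > s then v else s)

theorem firstGe_lt_length {t : Int} {l : List Int} {k : Nat} (h : firstGe t l = some k) :
    k < l.length := by
  induction l generalizing k with
  | nil => simp [firstGe] at h
  | cons v rest ih =>
    simp only [firstGe] at h
    split_ifs at h with hv
    · cases h; simp
    · rcases Option.map_eq_some_iff.mp h with ⟨k', hk', rfl⟩
      have := ih hk'; simp; omega

theorem suffMaxList_headD (l : List Int) : (suffMaxList l).headD none = sMax l := by
  induction l with
  | nil => simp [suffMaxList, sMax]
  | cons v rest ih => simp only [suffMaxList, sMax, ← ih]; rfl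

theorem suffMaxList_getElem? (l : List Int) (k : Nat) (hk : k ≤ l.length) :
    (suffMaxList l)[k]? = some (sMax (l.drop k)) := by
  induction l generalizing k with
  | nil =>
    have : k = 0 := by simpa using hk
    subst this
    simp [suffMaxList, sMax]
  | cons v rest ih =>
    cases k with
    | zero =>
      rw [List.drop_zero, ← suffMaxList_headD (v :: rest)]
      simp only [suffMaxList]
      simp
    | succ k =>
      simp only [suffMaxList, List.getElem?_cons_succ, List.drop_succ_cons]
      exact ih k (by simpa using hk)

theorem firstGe_isSome (t : Int) (l : List Int) :
    (firstGe t l).isSome ↔ ∃ x ∈ l, t ≤ x := by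
  induction l with
  | nil => simp [firstGe]
  | cons v rest ih =>
    simp only [firstGe]
    split_ifs with hv
    · exact iff_of_true rfl ⟨v, by simp, hv⟩
    · simp only [Option.isSome_map, ih, List.mem_cons]
      constructor
      · rintro ⟨x, hx, hxt⟩; exact ⟨x, Or.inr hx, hxt⟩
      · rintro ⟨x, rfl | hx, hxt⟩
        · omega
        · exact ⟨x, hx, hxt⟩

theorem sMax_spec (l : List Int) :
    (l = [] ∧ sMax l = none) ∨ ∃ m, sMax l = some m ∧ m ∈ l ∧ ∀ x ∈ l, x ≤ m := by
  induction l with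
  | nil => exact Or.inl ⟨rfl, rfl⟩
  | cons v rest ih =>
    right
    rcases ih with ⟨hnil, hnone⟩ | ⟨m, hm, hmem, hbound⟩
    · subst hnil
      exact ⟨v, rfl, by simp, by simp⟩
    · refine ⟨if v > m then v else m, ?_, ?_, ?_⟩
      · simp [sMax, hm]
      · split_ifs <;> simp [hmem]
      · intro x hx
        rcases List.mem_cons.mp hx with rfl | hx
        · split_ifs <;> omega
        · have := hbound x hx; split_ifs <;> omega

theorem aInner_spec (stops : List Int) (start : Int) :
    ∀ (fuel : Nat) (prev prev0 : Int) (segs : List (List Int)), 0 ≤ prev →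
      (stops.length : Int) ≤ prev + fuel →
      aInner stops start segs prev0 (PySem.List.pyRange prev (stops.length : Int) 1) =
        (match firstGe (start + 153) (stops.drop prev.toNat) with
         | some k => (segs ++ [[start, PySem.List.pyGetD stops ((k : Int) + prev) 0]], (k : Int) + prev)
         | none => (segs, prev0)) := by
  intro fuel
  induction fuel with
  | zero =>
    intro prev prev0 segs hp hf
    rw [PySem.List.pyRange_one_eq_nil (by omega)]
    rw [List.drop_eq_nil_of_le (by omega)]
    simp [aInner, firstGe]
  | succ fuel ih =>
    intro prev prev0 segs hp hf
    by_cases hlt : prev < (stops.length : Int)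
    · rw [PySem.List.pyRange_one_cons hlt]
      have hnat : prev.toNat < stops.length := by omega
      rw [List.drop_eq_getElem_cons hnat]
      have hget : PySem.List.pyGetD stops prev 0 = stops[prev.toNat] :=
        PySem.List.pyGetD_eq_getElem stops 0 hp hlt
      simp only [aInner, firstGe, hget]
      split_ifs with hv
      · simp [hget]
      · have hsucc : (prev + 1).toNat = prev.toNat + 1 := by omega
        have hih := ih (prev + 1) prev0 segs (by omega) (by omega)
        rw [hsucc] at hih
        rw [hih]
        cases hfg : firstGe (start + 153) (stops.drop (prev.toNat + 1)) with
        | none => simp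
        | some k =>
          have harith : ((k : Int)) + (prev + 1) = ((k + 1 : Nat) : Int) + prev := by
            push_cast; ring
          simp [harith]
    · rw [PySem.List.pyRange_one_eq_nil (by omega)]
      rw [List.drop_eq_nil_of_le (by omega)]
      simp [aInner, firstGe]

theorem bWhile_spec (stops : List Int) (t : Int) :
    ∀ (fuel : Nat) (prev : Int) (k : Nat), 0 ≤ prev →
      (stops.length : Int) ≤ prev + fuel →
      firstGe t (stops.drop prev.toNat) = some k →
      bWhile stops t prev = (k : Int) + prev := by
  intro fuel
  induction fuel with
  | zero =>
    intro prev k hp hf hfg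
    rw [List.drop_eq_nil_of_le (by omega)] at hfg
    simp [firstGe] at hfg
  | succ fuel ih =>
    intro prev k hp hf hfg
    by_cases hlt : prev < (stops.length : Int)
    · have hnat : prev.toNat < stops.length := by omega
      rw [List.drop_eq_getElem_cons hnat] at hfg
      have hget : PySem.List.pyGetD stops prev 0 = stops[prev.toNat] :=
        PySem.List.pyGetD_eq_getElem stops 0 hp hlt
      rw [bWhile]
      rw [dif_pos ⟨hp, hlt⟩, hget]
      simp only [firstGe] at hfg
      split_ifs at hfg with hv
      · rw [if_neg (by omega)]
        simp at hfg; omega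
      · rw [if_pos (by omega)]
        rcases Option.map_eq_some_iff.mp hfg with ⟨k', hk', rfl⟩
        have hsucc : (prev + 1).toNat = prev.toNat + 1 := by omega
        have := ih (prev + 1) k' (by omega) (by omega) (by rw [hsucc]; exact hk')
        rw [this]; push_cast; ring
    · rw [List.drop_eq_nil_of_le (by omega)] at hfg
      simp [firstGe] at hfg

theorem suffMaxList_length (l : List Int) : (suffMaxList l).length = l.length + 1 := by
  induction l with
  | nil => simp [suffMaxList]
  | cons v rest ih => simp [suffMaxList, ih]

theorem fold_eq (starts stops : List Int) :
    ∀ (segs : List (List Int)) (prev : Int), 0 ≤ prev → prev ≤ (stops.length : Int) →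
      starts.foldl
        (fun st start =>
          aInner stops start st.1 st.2 (PySem.List.pyRange st.2 (stops.length : Int) 1))
        (segs, prev) =
      starts.foldl
        (fun st start =>
          let t := start + 153
          match (PySem.List.pyGet? (suffMaxList stops) st.2).getD none with
          | none => st
          | some m =>
            if t ≤ m then
              let j := bWhile stops t st.2
              (st.1 ++ [[start, PySem.List.pyGetD stops j 0]], j)
            else st)
        (segs, prev) := by
  induction starts with
  | nil => intro segs prev _ _; rfl
  | cons start rest ih =>
    intro segs prev hp hple
    have hgetsuff : (PySem.List.pyGet? (suffMaxList stops) prev).getD none =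
        sMax (stops.drop prev.toNat) := by
      have hlen := suffMaxList_length stops
      rw [PySem.List.pyGet?_of_nonneg (suffMaxList stops) hp,
          suffMaxList_getElem? stops prev.toNat (by omega)]
      rfl
    have hA := aInner_spec stops start (stops.length) prev prev segs hp (by omega)
    simp only [List.foldl_cons, hA, hgetsuff]
    cases hfg : firstGe (start + 153) (stops.drop prev.toNat) with
    | none =>
      have hnoex : ¬ ∃ x ∈ stops.drop prev.toNat, start + 153 ≤ x := by
        rw [← firstGe_isSome, hfg]; simp
      cases hsm : sMax (stops.drop prev.toNat) with
      | none =>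
        simp only
        exact ih segs prev hp hple
      | some m =>
        have hmem : m ∈ stops.drop prev.toNat := by
          rcases sMax_spec (stops.drop prev.toNat) with ⟨_, hn⟩ | ⟨m', hm', hmem', _⟩
          · rw [hsm] at hn; cases hn
          · rw [hsm] at hm'; cases hm'; exact hmem'
        simp only
        rw [if_neg (fun h => hnoex ⟨m, hmem, h⟩)]
        exact ih segs prev hp hple
    | some k =>
      have hsome : (firstGe (start + 153) (stops.drop prev.toNat)).isSome := by rw [hfg]; rfl
      rcases (firstGe_isSome _ _).mp hsome with ⟨x, hxmem, hxt⟩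
      rcases sMax_spec (stops.drop prev.toNat) with ⟨hn, _⟩ | ⟨m, hsm, _, hbound⟩
      · rw [hn] at hxmem; cases hxmem
      · have hb := bWhile_spec stops (start + 153) (stops.length) prev k hp (by omega) hfg
        have hk : k < (stops.drop prev.toNat).length := firstGe_lt_length hfg
        simp only [List.length_drop] at hk
        simp only [hsm]
        rw [if_pos (le_trans hxt (hbound x hxmem)), hb]
        exact ih _ ((k : Int) + prev) (by omega) (by omega)

-- ===== VERDICT (by name: the statement is the Claim_ definition above) =====
theorem compute_ORF_segments_spec : Claim_equal_compute_ORF_segments := by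
  intro starts stops _
  show compute_ORF_segments starts stops = compute_ORF_segments_alt starts stops
  unfold compute_ORF_segments compute_ORF_segments_alt
  rw [fold_eq starts stops [] 0 le_rfl (by omega)]
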